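-- pv_equiv track=rewrite | github.com/ncupertino/analisedadospython | readData.py | getQtdGender
-- ===== SOURCE A (Python) =====
-- from collections import defaultdict
--
-- def getQtdGender(data):
--     objeto = {}
--     groups = defaultdict(list)
--     for obj in data:
--         groups[obj['Gender']].append(obj) # agrupando por Subject
--         pass
--     qtd_masculino = sum(1 for x in data if x['Gender'] == 'M')
--     qtd_feminino = sum(1 for x in data if x['Gender'] == 'F')
--     objeto['qtd_Gender'] = groups.__len__()
--     objeto['qtd_masculino'] = qtd_masculino
--     objeto['qtd_feminino'] = qtd_feminino
--     return objeto
-- ===== SOURCE B (Python) =====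
-- def getQtdGender(data):
--     genders = set()
--     qtd_masculino = 0
--     qtd_feminino = 0
--     for obj in data:
--         g = obj['Gender']
--         genders.add(g)
--         if g == 'M':
--             qtd_masculino += 1
--         elif g == 'F':
--             qtd_feminino += 1
--     return {'qtd_Gender': len(genders),
--             'qtd_masculino': qtd_masculino,
--             'qtd_feminino': qtd_feminino}
-- ===== Notes on version B (the rewrite author's own statement) =====
-- stated objective: simpler
-- what changed: One accumulating pass keeping a set of seen genders and two counters replaces A's three traversals (a defaultdict grouping loop whose grouped lists are discarded, plus two generator-sum passes).
import Mathlib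
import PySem

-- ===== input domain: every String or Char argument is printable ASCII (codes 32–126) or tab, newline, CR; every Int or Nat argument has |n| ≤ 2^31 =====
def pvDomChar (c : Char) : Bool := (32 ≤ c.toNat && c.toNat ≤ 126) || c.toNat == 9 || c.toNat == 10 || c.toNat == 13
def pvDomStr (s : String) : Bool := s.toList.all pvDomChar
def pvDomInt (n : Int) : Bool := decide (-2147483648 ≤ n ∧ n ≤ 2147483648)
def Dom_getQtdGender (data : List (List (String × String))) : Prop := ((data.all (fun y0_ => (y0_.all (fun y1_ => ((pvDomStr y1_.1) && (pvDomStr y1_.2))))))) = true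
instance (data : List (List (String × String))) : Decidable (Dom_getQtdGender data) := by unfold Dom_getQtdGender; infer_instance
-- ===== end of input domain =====

-- B replaces A's three traversals (grouping loop + two generator sums) by one accumulating pass
-- keeping a set of seen genders and two counters (objective: simpler).


-- ===== PORT A =====
-- obj['Gender'] (raises KeyError when the key is absent — excluded by Pre_; total form getD)
def pvGender (obj : List (String × String)) : String :=
  (PySem.Dict.mk obj).getD "Gender" ""

def getQtdGender (data : List (List (String × String))) : List (String × Int) :=
  -- groups = defaultdict(list); for obj in data: groups[obj['Gender']].append(obj)
  let groups : PySem.Dict String (List (List (String × String))) :=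
    data.foldl (fun g obj => g.modify (pvGender obj) [] (fun l => l ++ [obj])) PySem.Dict.empty
  -- qtd_masculino = sum(1 for x in data if x['Gender'] == 'M')
  let qtd_masculino : Int := data.foldl (fun acc x => if pvGender x == "M" then acc + 1 else acc) 0
  -- qtd_feminino = sum(1 for x in data if x['Gender'] == 'F')
  let qtd_feminino : Int := data.foldl (fun acc x => if pvGender x == "F" then acc + 1 else acc) 0
  -- objeto = {} followed by three assignments with distinct fresh keys = this assoc list in insertion order
  [("qtd_Gender", (groups.size : Int)), ("qtd_masculino", qtd_masculino), ("qtd_feminino", qtd_feminino)]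

-- ===== PORT B =====
-- single pass: state = (set of seen genders, qtd_masculino, qtd_feminino)
def pvStepB (st : PySem.Set String × Int × Int) (obj : List (String × String)) :
    PySem.Set String × Int × Int :=
  let g := pvGender obj
  (PySem.Set.add st.1 g,
   (if g == "M" then st.2.1 + 1 else st.2.1),
   (if g == "M" then st.2.2 else if g == "F" then st.2.2 + 1 else st.2.2))

def getQtdGender_alt (data : List (List (String × String))) : List (String × Int) :=
  let st := data.foldl pvStepB (PySem.Set.empty, 0, 0)
  -- dict literal with three distinct keys = this assoc list in insertion order
  [("qtd_Gender", (PySem.Set.len st.1 : Int)), ("qtd_masculino", st.2.1), ("qtd_feminino", st.2.2)]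

-- ===== PRECONDITION & SPEC =====
-- Pre_ excludes inputs where some record lacks the key 'Gender': there the Python A (and B) raises KeyError.
def Pre_getQtdGender (data : List (List (String × String))) : Prop :=
  (data.all (fun obj => (PySem.Dict.mk obj).contains "Gender")) = true
instance (data : List (List (String × String))) : Decidable (Pre_getQtdGender data) := by
  unfold Pre_getQtdGender; infer_instance

def pvWitness_getQtdGender : (List (List (String × String))) :=
  [[("Gender", "M")], [("Gender", "F"), ("Age", "3")], [("Gender", "M")]]

def Spec_getQtdGender (data : List (List (String × String))) (out : List (String × Int)) : Prop := out = getQtdGender_alt data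
instance (data : List (List (String × String))) (out : List (String × Int)) : Decidable (Spec_getQtdGender data out) := by unfold Spec_getQtdGender; infer_instance

-- ===== CLAIM (what is proved, stated in full; the proofs are below) =====
def Claim_equal_getQtdGender : Prop := ∀ (data : List (List (String × String))), Dom_getQtdGender data → Pre_getQtdGender data → Spec_getQtdGender data (getQtdGender data)

-- ===== LEMMAS AND PROOFS =====

-- B's single fold over the product state is the product of three independent folds.
theorem foldB_split (data : List (List (String × String))) (s : PySem.Set String) (m f : Int) :
    data.foldl pvStepB (s, m, f) =
      (data.foldl (fun t obj => PySem.Set.add t (pvGender obj)) s,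
       data.foldl (fun acc x => if pvGender x == "M" then acc + 1 else acc) m,
       data.foldl (fun acc x => if pvGender x == "M" then acc
                    else if pvGender x == "F" then acc + 1 else acc) f) := by
  induction data generalizing s m f with
  | nil => rfl
  | cons obj rest ih => simp only [List.foldl_cons, pvStepB, ih]

-- the 'elif'-shaped F-counter equals A's direct F-counter ("M" ≠ "F")
theorem foldF_eq (data : List (List (String × String))) (f : Int) :
    data.foldl (fun acc x => if pvGender x == "M" then acc
                 else if pvGender x == "F" then acc + 1 else acc) f =
    data.foldl (fun acc x => if pvGender x == "F" then acc + 1 else acc) f := by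
  induction data generalizing f with
  | nil => rfl
  | cons obj rest ih =>
    simp only [List.foldl_cons]
    rw [ih]
    by_cases hM : pvGender obj == "M"
    · have : ¬ (pvGender obj == "F") := by
        simp only [beq_iff_eq] at hM ⊢; simp [hM]
      simp [hM, this]
    · simp [hM]

-- A's group dict has as many entries as B's set of seen genders.
theorem groups_size_eq (data : List (List (String × String))) :
    (data.foldl (fun g obj => g.modify (pvGender obj) [] (fun l => l ++ [obj]))
        (PySem.Dict.empty : PySem.Dict String (List (List (String × String))))).size =
    PySem.Set.len (data.foldl (fun t obj => PySem.Set.add t (pvGender obj)) PySem.Set.empty) := by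
  have h := PySem.Dict.keys_foldl_modify_key data pvGender []
      (fun _ obj l => l ++ [obj]) (PySem.Dict.empty : PySem.Dict String (List (List (String × String))))
  have hsz : ∀ (d : PySem.Dict String (List (List (String × String)))), d.size = d.keys.length := by
    intro d; simp [PySem.Dict.size, PySem.Dict.keys]
  rw [hsz, h]
  have hupd : (PySem.Set.update (PySem.Dict.empty : PySem.Dict String (List (List (String × String)))).keys
      (data.map pvGender)) = PySem.Set.ofList (data.map pvGender) := by
    simp [PySem.Set.update, PySem.Set.ofList_eq_foldl, PySem.Dict.empty, PySem.Dict.keys]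
  rw [hupd, PySem.Set.ofList_eq_foldl, List.foldl_map]
  rfl

-- ===== VERDICT (by name: the statement is the Claim_ definition above) =====
theorem getQtdGender_spec : Claim_equal_getQtdGender := by
  intro data _ _
  show getQtdGender data = getQtdGender_alt data
  simp only [getQtdGender, getQtdGender_alt, foldB_split, foldF_eq, groups_size_eq]
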